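-- pv_equiv track=rewrite | github.com/SectorCT/TheGreatFilter | core/routers/filters.py | _find_edge_atoms
-- ===== SOURCE A (Python) =====
-- def _find_edge_atoms(
--     atoms: list[dict], bonds: list[tuple], element: str = "C"
-- ) -> set:
--     """Return indices of atoms of given element with fewer than 3 bonds."""
--     degree: dict = {}
--     for i, p in enumerate(atoms):
--         if p["element"] == element:
--             degree[i] = 0
--     for i, j, _ in bonds:
--         if i in degree:
--             degree[i] = degree.get(i, 0) + 1
--         if j in degree:
--             degree[j] = degree.get(j, 0) + 1
--     return {idx for idx, deg in degree.items() if deg < 3}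
-- ===== SOURCE B (Python) =====
-- def _find_edge_atoms(
--     atoms: list[dict], bonds: list[tuple], element: str = "C"
-- ) -> set:
--     """Return indices of atoms of given element with fewer than 3 bonds."""
--     return {
--         idx
--         for idx, atom in enumerate(atoms)
--         if atom["element"] == element
--         and sum(e == idx for i, j, _ in bonds for e in (i, j)) < 3
--     }
-- ===== Notes on version B (the rewrite author's own statement) =====
-- stated objective: alternative
-- what changed: B has no degree dictionary at all: it is a single set comprehension that, for each atom of the requested element, counts its occurrences among bond endpoints by a direct brute-force scan of the bonds list.
import Mathlib
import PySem

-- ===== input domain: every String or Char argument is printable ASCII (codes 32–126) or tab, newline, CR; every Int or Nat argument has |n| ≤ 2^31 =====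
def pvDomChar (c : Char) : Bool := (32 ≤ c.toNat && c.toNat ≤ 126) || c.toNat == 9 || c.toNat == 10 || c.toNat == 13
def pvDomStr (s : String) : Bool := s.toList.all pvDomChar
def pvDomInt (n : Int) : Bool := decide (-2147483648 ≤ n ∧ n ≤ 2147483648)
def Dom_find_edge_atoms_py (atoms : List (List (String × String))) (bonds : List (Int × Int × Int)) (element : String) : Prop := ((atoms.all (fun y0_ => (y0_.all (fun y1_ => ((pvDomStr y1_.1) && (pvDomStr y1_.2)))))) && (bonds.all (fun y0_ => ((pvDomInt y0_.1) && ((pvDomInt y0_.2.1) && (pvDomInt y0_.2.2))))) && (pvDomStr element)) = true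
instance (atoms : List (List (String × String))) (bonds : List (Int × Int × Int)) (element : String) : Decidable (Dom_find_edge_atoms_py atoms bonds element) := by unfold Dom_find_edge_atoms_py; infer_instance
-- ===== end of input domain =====

-- B drops the degree dictionary entirely: one pass over atoms with a brute-force per-atom count of bond endpoints (alternative algorithm, same result).


-- ===== PORT A =====
def find_edge_atoms_py (atoms : List (List (String × String))) (bonds : List (Int × Int × Int)) (element : String) : List Int :=
  let degree : PySem.Dict Int Int :=
    (PySem.List.enumerate atoms).foldl
      (fun d ip =>
        if (PySem.Dict.mk ip.2).getD "element" "" == element then d.insert ip.1 0 else d)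
      PySem.Dict.empty
  let degree :=
    bonds.foldl
      (fun d b =>
        let d := if d.contains b.1 then d.insert b.1 (d.getD b.1 0 + 1) else d
        if d.contains b.2.1 then d.insert b.2.1 (d.getD b.2.1 0 + 1) else d)
      degree
  (degree.items.filter (fun kv => kv.2 < 3)).map (fun kv => kv.1)

-- ===== PORT B =====
-- B: no dict; for each enumerated atom of the element, count its index among bond endpoints by direct scan.
def find_edge_atoms_py_alt (atoms : List (List (String × String))) (bonds : List (Int × Int × Int)) (element : String) : List Int :=
  (PySem.List.enumerate atoms).filterMap
    (fun ip =>
      if (PySem.Dict.mk ip.2).getD "element" "" == element &&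
         decide (((bonds.flatMap (fun b => [b.1, b.2.1])).count ip.1 : Int) < 3)
      then some ip.1 else none)

-- ===== PRECONDITION & SPEC =====
-- Pre_ excludes exactly the atoms lacking an "element" key, on which Python A raises KeyError.
def Pre_find_edge_atoms_py (atoms : List (List (String × String))) (bonds : List (Int × Int × Int)) (element : String) : Prop :=
  (atoms.all (fun a => (PySem.Dict.mk a).contains "element")) = true
instance (atoms : List (List (String × String))) (bonds : List (Int × Int × Int)) (element : String) : Decidable (Pre_find_edge_atoms_py atoms bonds element) := by unfold Pre_find_edge_atoms_py; infer_instance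

def pvWitness_find_edge_atoms_py : (List (List (String × String))) × (List (Int × Int × Int)) × String :=
  ([[("element", "C")], [("element", "N")]], [(0, 1, 1)], "C")

def Spec_find_edge_atoms_py (atoms : List (List (String × String))) (bonds : List (Int × Int × Int)) (element : String) (out : List Int) : Prop := out = find_edge_atoms_py_alt atoms bonds element
instance (atoms : List (List (String × String))) (bonds : List (Int × Int × Int)) (element : String) (out : List Int) : Decidable (Spec_find_edge_atoms_py atoms bonds element out) := by unfold Spec_find_edge_atoms_py; infer_instance

-- ===== CLAIM (what is proved, stated in full; the proofs are below) =====
def Claim_equal_find_edge_atoms_py : Prop := ∀ (atoms : List (List (String × String))) (bonds : List (Int × Int × Int)) (element : String), Dom_find_edge_atoms_py atoms bonds element → Pre_find_edge_atoms_py atoms bonds element → Spec_find_edge_atoms_py atoms bonds element (find_edge_atoms_py atoms bonds element)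

-- ===== LEMMAS AND PROOFS =====

-- the flat list of bond endpoints, in traversal order
def pvEnds (bonds : List (Int × Int × Int)) : List Int := bonds.flatMap (fun b => [b.1, b.2.1])

-- a fold doing two steps per bond is a fold over the flattened endpoint list
theorem pv_foldl_ends {α : Type} (g : α → Int → α) (bonds : List (Int × Int × Int)) (d : α) :
    bonds.foldl (fun d b => g (g d b.1) b.2.1) d = (pvEnds bonds).foldl g d := by
  induction bonds generalizing d with
  | nil => rfl
  | cons b bs ih => simp only [pvEnds, List.flatMap_cons, List.foldl_cons, List.foldl_append] at *; simp [ih]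

-- A's bond loop, rephrased over the endpoint list (definitional)
theorem pv_foldl_ends_A (bonds : List (Int × Int × Int)) (d : PySem.Dict Int Int) :
    bonds.foldl
      (fun d b =>
        let d := if d.contains b.1 then d.insert b.1 (d.getD b.1 0 + 1) else d
        if d.contains b.2.1 then d.insert b.2.1 (d.getD b.2.1 0 + 1) else d)
      d
    = (pvEnds bonds).foldl (fun d x => if d.contains x then d.insert x (d.getD x 0 + 1) else d) d :=
  pv_foldl_ends (fun d x => if d.contains x then d.insert x (d.getD x 0 + 1) else d) bonds d

-- one guarded increment step on a Nodup-keyed dict, seen on items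
theorem pv_step_items (d : PySem.Dict Int Int) (hnd : d.keys.Nodup) (x : Int) :
    (if d.contains x then d.insert x (d.getD x 0 + 1) else d).items
      = d.items.map (fun kv => (kv.1, kv.2 + if kv.1 = x then 1 else 0)) := by
  by_cases hc : d.contains x = true
  · rw [if_pos hc, PySem.Dict.items_insert_of_contains d _ hc]
    apply List.map_congr_left
    intro kv hkv
    by_cases hk : kv.1 = x
    · have hv : d.getD x 0 = kv.2 := by
        subst hk
        exact PySem.Dict.getD_of_mem_items d (by exact_mod_cast hkv) hnd 0
      simp [hk, hv]
    · simp [hk]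
  · rw [if_neg hc]
    have hx : x ∉ d.keys := by
      intro hmem
      exact hc ((PySem.Dict.contains_iff_mem_keys d x).mpr hmem)
    conv_lhs => rw [← List.map_id d.items]
    apply List.map_congr_left
    intro kv hkv
    have hne : kv.1 ≠ x := by
      intro h; exact hx (h ▸ PySem.Dict.mem_keys_of_mem_items d hkv)
    simp [hne]

-- keys are unchanged by the guarded step
theorem pv_step_keys (d : PySem.Dict Int Int) (hnd : d.keys.Nodup) (x : Int) :
    (if d.contains x then d.insert x (d.getD x 0 + 1) else d).keys = d.keys := by
  have h := pv_step_items d hnd x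
  simp only [PySem.Dict.keys, h, List.map_map]
  rfl

-- folding the guarded increments over a list adds the endpoint count to every entry
theorem pv_fold_items (ends : List Int) (d : PySem.Dict Int Int) (hnd : d.keys.Nodup) :
    (ends.foldl (fun d x => if d.contains x then d.insert x (d.getD x 0 + 1) else d) d).items
      = d.items.map (fun kv => (kv.1, kv.2 + (ends.count kv.1 : Int))) := by
  induction ends generalizing d with
  | nil => simp
  | cons e es ih =>
    have hnd' : ((if d.contains e then d.insert e (d.getD e 0 + 1) else d).keys).Nodup := by
      rw [pv_step_keys d hnd e]; exact hnd
    simp only [List.foldl_cons]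
    rw [ih _ hnd', pv_step_items d hnd e, List.map_map]
    apply List.map_congr_left
    intro kv _
    simp only [Function.comp]
    by_cases hk : kv.1 = e
    · simp [hk]; ring
    · simp [hk, Ne.symm hk]

-- 'if q x then some (f x) else none' under filterMap is filter-then-map
theorem pv_filterMap_if {α β : Type} (l : List α) (q : α → Bool) (f : α → β) :
    l.filterMap (fun x => if q x then some (f x) else none) = (l.filter q).map f := by
  induction l with
  | nil => rfl
  | cons x xs ih => by_cases h : q x <;> simp [h, ih]

-- the whole equality, written over the ports' unfolded bodies
theorem pv_main (atoms : List (List (String × String))) (bonds : List (Int × Int × Int)) (element : String) :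
    ((bonds.foldl
        (fun d b =>
          let d := if d.contains b.1 then d.insert b.1 (d.getD b.1 0 + 1) else d
          if d.contains b.2.1 then d.insert b.2.1 (d.getD b.2.1 0 + 1) else d)
        ((PySem.List.enumerate atoms).foldl
          (fun d ip => if (PySem.Dict.mk ip.2).getD "element" "" == element then d.insert ip.1 0 else d)
          (PySem.Dict.empty : PySem.Dict Int Int))).items.filter (fun kv => kv.2 < 3)).map (fun kv => kv.1)
    = (PySem.List.enumerate atoms).filterMap
        (fun ip =>
          if (PySem.Dict.mk ip.2).getD "element" "" == element &&
             decide (((bonds.flatMap (fun b => [b.1, b.2.1])).count ip.1 : Int) < 3)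
          then some ip.1 else none) := by
  rw [pv_foldl_ends_A]
  have hinit :
      ((PySem.List.enumerate atoms).foldl
        (fun d ip => if (PySem.Dict.mk ip.2).getD "element" "" == element then d.insert ip.1 0 else d)
        (PySem.Dict.empty : PySem.Dict Int Int))
      = ((PySem.List.enumerate atoms).filter
          (fun ip => (PySem.Dict.mk ip.2).getD "element" "" == element)).foldl
          (fun d ip => d.insert ip.1 (0 : Int)) PySem.Dict.empty :=
    (List.foldl_filter).symm
  rw [hinit]
  set l : List (Int × List (String × String)) :=
    (PySem.List.enumerate atoms).filter
      (fun ip => (PySem.Dict.mk ip.2).getD "element" "" == element) with hl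
  have hfst : (l.map (fun a => a.1)).Nodup := by
    have hpe : (PySem.List.enumerate atoms).Pairwise (fun a b => a.1 < b.1) :=
      PySem.List.pairwise_lt_enumerate atoms 0
    have hpl : l.Pairwise (fun a b => a.1 < b.1) := List.Pairwise.filter _ hpe
    exact List.pairwise_map.mpr (hpl.imp (fun h => ne_of_lt h))
  have h2 :
      (l.foldl (fun d ip => d.insert ip.1 (0 : Int)) PySem.Dict.empty).items
        = l.map (fun a => (a.1, (0 : Int))) := by
    have := PySem.Dict.items_foldl_insert_fresh l (fun a => a.1) (fun _ => (0:Int))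
      PySem.Dict.empty (fun a _ => PySem.Dict.contains_empty a.1) hfst
    simpa using this
  have hnd0 : (l.foldl (fun d ip => d.insert ip.1 (0 : Int)) PySem.Dict.empty).keys.Nodup := by
    simp only [PySem.Dict.keys, h2, List.map_map]
    exact hfst
  rw [pv_fold_items _ _ hnd0, h2, List.map_map]
  rw [pv_filterMap_if (PySem.List.enumerate atoms)
        (fun ip => ((PySem.Dict.mk ip.2).getD "element" "" == element) &&
          decide (((bonds.flatMap (fun b => [b.1, b.2.1])).count ip.1 : Int) < 3))
        (fun ip => ip.1)]
  rw [List.filter_map, List.map_map]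
  rw [hl, List.filter_filter]
  apply congrArg (List.map _)
  apply List.filter_congr
  intro a _
  simp [pvEnds, Bool.and_comm]

-- ===== VERDICT (by name: the statement is the Claim_ definition above) =====
theorem find_edge_atoms_py_spec : Claim_equal_find_edge_atoms_py := by
  intro atoms bonds element _ _
  unfold Spec_find_edge_atoms_py find_edge_atoms_py find_edge_atoms_py_alt
  exact pv_main atoms bonds element
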